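-- pv_equiv track=rewrite | github.com/sherif-abdelsalam/ITI | Python/day_2/p5_max_alpha.py | get_max_alph
-- ===== SOURCE A (Python) =====
-- def get_max_alph(val: str) -> str:
--     if not val:
--         return ""
--
--     ans = ""
--     tmp = val[0]
--     i = 1
--
--     while i < len(val):
--         if val[i] > val[i - 1]:
--             tmp += val[i]
--         else:
--             tmp = val[i]
--         if len(tmp) > len(ans):
--             ans = tmp
--         i += 1
--
--     return ans
-- ===== SOURCE B (Python) =====
-- def get_max_alph(val: str) -> str:
--     if not val:
--         return ""
--     best_len, best_end = 1, 1
--     cur = 1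
--     prev = val[0]
--     for i, c in enumerate(val[1:], 1):
--         cur = cur + 1 if c > prev else 1
--         if cur > best_len:
--             best_len, best_end = cur, i + 1
--         prev = c
--     return val[best_end - best_len:best_end]
-- ===== Notes on version B (the rewrite author's own statement) =====
-- stated objective: faster
-- what changed: B replaces A's repeated string concatenation/assignment of candidate substrings (O(n^2) worst case from building tmp/ans strings) by a single pass that tracks only the current run length and the best run's length and end index, slicing the input once at the end.
-- intended difference: On strings with no strictly increasing adjacent pair (every increasing run has length 1), A returns the empty string for a one-character input and otherwise val[1] (an artefact of ans starting empty and tmp being reset before the comparison), while B returns the first maximal run val[0], the intended longest strictly-increasing substring. — e.g. on get_max_alph("ba"): A returns "a", B returns "b"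
import Mathlib
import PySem

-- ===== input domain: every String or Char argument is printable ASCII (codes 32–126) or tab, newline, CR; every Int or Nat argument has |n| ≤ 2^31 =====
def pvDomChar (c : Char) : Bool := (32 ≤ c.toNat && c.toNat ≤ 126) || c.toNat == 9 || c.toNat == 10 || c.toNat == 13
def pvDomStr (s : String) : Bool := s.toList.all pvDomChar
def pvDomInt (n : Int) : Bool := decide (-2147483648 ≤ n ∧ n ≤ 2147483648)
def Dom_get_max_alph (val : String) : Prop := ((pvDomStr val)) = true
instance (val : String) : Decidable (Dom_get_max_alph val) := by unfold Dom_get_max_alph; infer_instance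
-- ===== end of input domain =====

-- B replaces A's quadratic string accumulation by a single pass that tracks only the
-- current run length and the best run's length/end index, slicing the input once at the end.

-- ===== PORT A =====
-- the while loop, step for step: state (tmp, ans), `prev` is val[i-1], `rest` is val[i:]
def pvA_loop (prev : Char) (rest : List Char) (tmp ans : List Char) : List Char :=
  match rest with
  | [] => ans
  | c :: rest' =>
    let tmp' := if prev < c then tmp ++ [c] else [c]   -- val[i] > val[i-1] on 1-char strings = code-point compare
    let ans' := if ans.length < tmp'.length then tmp' else ans
    pvA_loop c rest' tmp' ans'

def get_max_alph (val : String) : String :=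
  match val.toList with
  | [] => ""                                            -- if not val: return ""
  | c :: rest => String.ofList (pvA_loop c rest [c] []) -- ans = "", tmp = val[0], i = 1

-- ===== PORT B =====
-- one fold step of Source B's loop over enumerate(val[1:], 1); state (prev, cur, best_len, best_end)
def pvB_step (st : Char × Nat × Nat × Nat) (p : Char × Nat) : Char × Nat × Nat × Nat :=
  let prev := st.1; let cur := st.2.1; let bl := st.2.2.1; let be := st.2.2.2
  let c := p.1; let i := p.2
  let cur' := if prev < c then cur + 1 else 1
  let blbe := if bl < cur' then (cur', i + 1) else (bl, be)
  (c, cur', blbe.1, blbe.2)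

def get_max_alph_alt (val : String) : String :=
  match val.toList with
  | [] => ""
  | c0 :: rest =>
    let st := (rest.zipIdx 1).foldl pvB_step (c0, 1, 1, 1)
    let bl := st.2.2.1
    let be := st.2.2.2
    -- val[best_end-best_len:best_end]: 0 ≤ be-bl ≤ be ≤ len(val), so the slice is drop/take (exact here)
    String.ofList (((c0 :: rest).drop (be - bl)).take bl)

-- ===== PRECONDITION & SPEC =====
-- On strings with no strictly increasing adjacent pair (so every increasing run has length 1,
-- including single-character strings), A returns the empty string for a 1-char input and otherwise the accident
-- val[1], while B returns the first maximal run val[0], the intended longest increasing substring.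
def D_get_max_alph (val : String) : Prop :=
  List.IsChain (fun a b : Char => ¬ a < b) val.toList ∧ val.toList[1]? ≠ val.toList[0]?
instance (val : String) : Decidable (D_get_max_alph val) := by unfold D_get_max_alph; infer_instance

def Spec_get_max_alph (val : String) (out : String) : Prop := ¬ D_get_max_alph val → out = get_max_alph_alt val
instance (val : String) (out : String) : Decidable (Spec_get_max_alph val out) := by unfold Spec_get_max_alph; infer_instance

def pvDiffWitness_get_max_alph : String := "ba"
def pvDiffWitnessOut_get_max_alph : String × String := ("a", "b")

-- ===== CLAIM (what is proved, stated in full; the proofs are below) =====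
def Claim_unchanged_get_max_alph : Prop := ∀ (val : String), Dom_get_max_alph val → Spec_get_max_alph val (get_max_alph val)
def Claim_changed_get_max_alph : Prop := Dom_get_max_alph (pvDiffWitness_get_max_alph) ∧ D_get_max_alph (pvDiffWitness_get_max_alph) ∧ get_max_alph (pvDiffWitness_get_max_alph) = pvDiffWitnessOut_get_max_alph.1 ∧ get_max_alph_alt (pvDiffWitness_get_max_alph) = pvDiffWitnessOut_get_max_alph.2 ∧ pvDiffWitnessOut_get_max_alph.1 ≠ pvDiffWitnessOut_get_max_alph.2
def Claim_exact_get_max_alph : Prop := ∀ (val : String), Dom_get_max_alph val → D_get_max_alph val → get_max_alph val ≠ get_max_alph_alt val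

-- ===== LEMMAS AND PROOFS =====

-- proof-side helper: boolean form of "no adjacent strict increase"
def pvNoninc : List Char → Bool
  | [] => true
  | [_] => true
  | a :: b :: t => !(decide (a < b)) && pvNoninc (b :: t)

theorem pvNoninc_iff (l : List Char) : pvNoninc l = true ↔ List.IsChain (fun a b : Char => ¬ a < b) l := by
  induction l with
  | nil => simp [pvNoninc]
  | cons a t ih =>
    cases t with
    | nil => simp [pvNoninc]
    | cons b t' => rw [List.isChain_cons_cons, ← ih]; simp [pvNoninc]

theorem pvOfList_inj (a b : List Char) (h : String.ofList a = String.ofList b) : a = b := by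
  have := congrArg String.toList h
  simpa using this

-- The synchronised phase: once ans's length agrees with best_len (and ans is the recorded best
-- slice), A's loop and B's fold stay in lock-step and end with A's ans equal to B's final slice.
theorem pvSync (rest : List Char) : ∀ (l : List Char) (i cur bl be : Nat) (prev : Char)
    (tmp ans : List Char),
    prev :: rest = l.drop (i - 1) → 1 ≤ i → 1 ≤ cur → cur ≤ i →
    tmp = (l.drop (i - cur)).take cur → tmp.length = cur →
    ans.length = bl → ans = (l.drop (be - bl)).take bl →
    pvA_loop prev rest tmp ans =
      (l.drop (((rest.zipIdx i).foldl pvB_step (prev, cur, bl, be)).2.2.2 -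
               ((rest.zipIdx i).foldl pvB_step (prev, cur, bl, be)).2.2.1)).take
        ((rest.zipIdx i).foldl pvB_step (prev, cur, bl, be)).2.2.1 := by
  induction rest with
  | nil =>
    intro l i cur bl be prev tmp ans hd hi hc1 hci htmp htl hal hans
    simpa [pvA_loop] using hans
  | cons c rest' ih =>
    intro l i cur bl be prev tmp ans hd hi hc1 hci htmp htl hal hans
    have hd' : c :: rest' = l.drop i := by
      have h2 : (prev :: c :: rest').drop 1 = (l.drop (i-1)).drop 1 := by rw [hd]
      simp [List.drop_drop] at h2
      rw [h2]; congr 1; omega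
    have hcel : l[i]? = some c := by
      have h3 : (l.drop i)[0]? = some c := by rw [← hd']; rfl
      rw [List.getElem?_drop] at h3; simpa using h3
    by_cases hpc : prev < c
    · have htmp' : tmp ++ [c] = (l.drop (i - cur)).take (cur + 1) := by
        rw [List.take_add_one, List.getElem?_drop, show i - cur + cur = i from by omega, hcel, htmp]
        simp
      by_cases hbl : bl < cur + 1
      · have key := ih l (i+1) (cur+1) (cur+1) (i+1) c (tmp++[c]) (tmp++[c])
          (by simpa using hd') (by omega) (by omega) (by omega)
          (by rw [show (i+1)-(cur+1) = i-cur from by omega]; exact htmp')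
          (by simp [htl]) (by simp [htl])
          (by rw [show (i+1)-(cur+1) = i-cur from by omega]; exact htmp')
        simpa [pvA_loop, pvB_step, hpc, htl, hal, hbl] using key
      · have key := ih l (i+1) (cur+1) bl be c (tmp++[c]) ans
          (by simpa using hd') (by omega) (by omega) (by omega)
          (by rw [show (i+1)-(cur+1) = i-cur from by omega]; exact htmp')
          (by simp [htl]) hal hans
        simpa [pvA_loop, pvB_step, hpc, htl, hal, hbl] using key
    · have htmp' : [c] = (l.drop i).take 1 := by rw [← hd']; rfl
      by_cases hbl : bl < 1
      · have key := ih l (i+1) 1 1 (i+1) c [c] [c]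
          (by simpa using hd') (by omega) (by omega) (by omega)
          (by simpa using htmp') (by simp) (by simp)
          (by simpa using htmp')
        simpa [pvA_loop, pvB_step, hpc, htl, hal, hbl] using key
      · have key := ih l (i+1) 1 bl be c [c] ans
          (by simpa using hd') (by omega) (by omega) (by omega)
          (by simpa using htmp') (by simp) hal hans
        simpa [pvA_loop, pvB_step, hpc, htl, hal, hbl] using key

-- On a non-increasing tail, A never updates a length-1 ans and B's best stays (1,1).
theorem pvFlat (rest : List Char) : ∀ (i : Nat) (prev : Char) (tmp ans : List Char),
    pvNoninc (prev :: rest) = true → ans.length = 1 →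
    pvA_loop prev rest tmp ans = ans ∧
    ((rest.zipIdx i).foldl pvB_step (prev, 1, 1, 1)).2.2.1 = 1 ∧
    ((rest.zipIdx i).foldl pvB_step (prev, 1, 1, 1)).2.2.2 = 1 := by
  induction rest with
  | nil => intro i prev tmp ans _ _; exact ⟨rfl, rfl, rfl⟩
  | cons c rest' ih =>
    intro i prev tmp ans hni hal
    simp only [pvNoninc, Bool.and_eq_true, Bool.not_eq_true'] at hni
    obtain ⟨hpc, hni'⟩ := hni
    have hpc' : ¬ prev < c := by simpa using hpc
    have this := ih (i+1) c [c] ans hni' hal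
    refine ⟨?_, ?_, ?_⟩
    · simpa [pvA_loop, hpc', hal] using this.1
    · simpa [pvB_step, hpc'] using this.2.1
    · simpa [pvB_step, hpc'] using this.2.2

-- The pre-sync phase (no increase seen yet): either an increase occurs and we land in the
-- synchronised phase, or the remainder is non-increasing and both states keep their initial bests.
theorem pvPh1 (rest : List Char) : ∀ (l : List Char) (i : Nat) (prev : Char) (ans : List Char),
    prev :: rest = l.drop (i - 1) → 2 ≤ i → ans.length = 1 → ans = (l.drop 1).take 1 →
    (pvA_loop prev rest [prev] ans =
      (l.drop (((rest.zipIdx i).foldl pvB_step (prev, 1, 1, 1)).2.2.2 -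
               ((rest.zipIdx i).foldl pvB_step (prev, 1, 1, 1)).2.2.1)).take
        ((rest.zipIdx i).foldl pvB_step (prev, 1, 1, 1)).2.2.1)
    ∨ (((rest.zipIdx i).foldl pvB_step (prev, 1, 1, 1)).2.2.1 = 1 ∧
       ((rest.zipIdx i).foldl pvB_step (prev, 1, 1, 1)).2.2.2 = 1 ∧
       pvA_loop prev rest [prev] ans = ans ∧
       pvNoninc (prev :: rest) = true) := by
  induction rest with
  | nil =>
    intro l i prev ans hd hi hal hans
    right
    exact ⟨rfl, rfl, rfl, rfl⟩
  | cons c rest' ih =>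
    intro l i prev ans hd hi hal hans
    have hd' : c :: rest' = l.drop i := by
      have h2 : (prev :: c :: rest').drop 1 = (l.drop (i-1)).drop 1 := by rw [hd]
      simp [List.drop_drop] at h2
      rw [h2]; congr 1; omega
    by_cases hpc : prev < c
    · left
      have htmp2 : [prev, c] = (l.drop (i-1)).take 2 := by rw [← hd]; rfl
      have key := pvSync rest' l (i+1) 2 2 (i+1) c [prev, c] [prev, c]
        (by simpa using hd') (by omega) (by omega) (by omega)
        (by rw [show (i+1)-2 = i-1 from by omega]; exact htmp2)
        (by simp) (by simp)
        (by rw [show (i+1)-2 = i-1 from by omega]; exact htmp2)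
      simpa [pvA_loop, pvB_step, hpc, hal] using key
    · have key := ih l (i+1) c ans (by simpa using hd') (by omega) hal hans
      rcases key with h | ⟨h1, h2, h3, h4⟩
      · left; simpa [pvA_loop, pvB_step, hpc, hal] using h
      · right
        refine ⟨by simpa [pvB_step, hpc] using h1, by simpa [pvB_step, hpc] using h2,
          by simpa [pvA_loop, pvB_step, hpc, hal] using h3, ?_⟩
        simp [pvNoninc, hpc, h4]

-- ===== VERDICT (by name: the statement is the Claim_ definition above) =====
theorem get_max_alph_spec : Claim_unchanged_get_max_alph := by
  intro val _
  unfold Spec_get_max_alph D_get_max_alph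
  intro hnD
  match h : val.toList with
  | [] => simp [get_max_alph, get_max_alph_alt, h]
  | [a] => rw [h] at hnD; exact absurd ⟨by simp, by simp⟩ hnD
  | a :: b :: t =>
    rw [h] at hnD
    simp only [get_max_alph, get_max_alph_alt, h]
    by_cases hab : a < b
    · have key := pvSync t (a :: b :: t) 2 2 2 2 b [a, b] [a, b]
        rfl (by omega) (by omega) (by omega) rfl rfl rfl rfl
      simpa [pvA_loop, pvB_step, List.zipIdx_cons, hab] using congrArg String.ofList key
    · have key := pvPh1 t (a :: b :: t) 2 b [b] rfl (by omega) rfl rfl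
      rcases key with hk | ⟨h1, h2, h3, h4⟩
      · simpa [pvA_loop, pvB_step, List.zipIdx_cons, hab] using congrArg String.ofList hk
      · have hni : pvNoninc (a :: b :: t) = true := by
          simp only [pvNoninc, Bool.and_eq_true, Bool.not_eq_true']
          exact ⟨by simpa using hab, h4⟩
        have hab' : a = b := by
          by_contra hne
          exact hnD ⟨(pvNoninc_iff _).1 hni, by simp [Ne.symm hne]⟩
        cases hab'
        simp [pvA_loop, pvB_step, List.zipIdx_cons, h1, h2, h3]

theorem get_max_alph_changed : Claim_changed_get_max_alph := by
  unfold Claim_changed_get_max_alph; decide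

theorem get_max_alph_tight : Claim_exact_get_max_alph := by
  intro val _ hD
  unfold D_get_max_alph at hD
  match h : val.toList with
  | [] => rw [h] at hD; simp at hD
  | [a] =>
    simp only [get_max_alph, get_max_alph_alt, h]
    intro heq
    have h2 := pvOfList_inj _ _ heq
    simp [pvA_loop] at h2
  | a :: b :: t =>
    rw [h] at hD
    obtain ⟨hch, hne'⟩ := hD
    have hne : ¬ b = a := fun hba => hne' (by simp [hba])
    have hni : pvNoninc (a :: b :: t) = true := (pvNoninc_iff _).2 hch
    have hsplit : ¬ a < b ∧ pvNoninc (b :: t) = true := by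
      simp only [pvNoninc, Bool.and_eq_true, Bool.not_eq_true'] at hni
      exact ⟨by simpa using hni.1, hni.2⟩
    have flat := pvFlat t 2 b [b] [b] hsplit.2 rfl
    simp only [get_max_alph, get_max_alph_alt, h]
    intro heq
    have h2 := pvOfList_inj _ _ heq
    simp [pvA_loop, pvB_step, List.zipIdx_cons, hsplit.1, flat.1, flat.2.1, flat.2.2] at h2
    exact hne h2
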